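/- GENERATED by tools/from_farm_form.py from prooffarm-gif/accepted/DGifGetImageHeader.4/Lemmas.lean (a worked proof of the farm's unit `DGifGetImageHeader.4`,
   accepted by the verdict) — do not edit. -/
import Gif.Spec.Units.DGifGetImageHeader_4
import Gif.Spec.AllSegs

/-!
  Lemmas for the unit `DGifGetImageHeader.4` (the head of the colour loop, dgif_lib.c:404-410): the segment is walked in TWO STEPS
  that meet at the return address 0x109026 (`ret24`) of `InternalRead(gif, Buf, 3)`, with a private assertion there.

      gih4_AtRet24       the assertion at `ret24`: `Mid` + the loop's facts with `i < count` (what `Colour` says, one instruction earlier)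
      gih4_env_at_call   `Env.at_call` for a PRESENT heap and forest that differ from the entry's (`SameRegion`)
      gih4_free_step     the pure step of the error arm: `GifFreeMapObject(icm)`, then the stores of `Error` and of NULL
      gih4_free_same, gih4_free_coarse
                         GifFreeMapObject's footprint since the segment's start; without `shadowSpan` for the frame tactics
      gih4_seg_head      0x108ffe … the test … 0x108f4e, or … the call of InternalRead … 0x109026: `Head` → `Mid` ∨ `gih4_AtRet24`
      gih4_seg_tail      0x109026 … 0x10902f (three bytes), or 0x1090e3 … 0x108e78 (the short read): `gih4_AtRet24` → `Colour` ∨ `Done`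
-/

open X86 X86.User Asan ProgX.Base ProgX.Base.Spec Gif.Spec

set_option maxRecDepth 4000
set_option maxHeartbeats 4000000

namespace Gif.Spec.DGifGetImageHeader_4

/-- **At 109026H (ret24), `InternalRead(gif, Buf, 3)` has returned**: `Mid` (so `Body` for the present heap and forest), and the
loop's facts with the index strictly below the count (the test at 10900EH was passed). Nothing is said about `eax`: the short-read
arm needs no fact about the count delivered. -/
structure gih4_AtRet24 (m : Nat) (H : Heap) (rest : List Obj) (frames : List (Nat × FrameLayout)) (F : Forest) (R : Rd)
    (Hc : Heap) (Fc : Forest) (u₀ e : State) (ret : Word) (v : State) : Prop where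
  mid : DGifGetImageHeader.Mid Gif.L.DGifGetImageHeader.ret24 H rest frames F R Hc Fc u₀ e ret v
  loop : ∃ mp : Map, Fc.icm = some mp ∧ (v.reg .r14).toNat < mp.count ∧ mp.count - (v.reg .r14).toNat = m

/-- **`Env` at the entry of a callee of a protected function whose PRESENT heap and forest differ from the entry's**: `Env.at_call`
(Gif/Spec/FrameCarry.lean) asks the same heap for the entry's environment and the body's invariants; here the static facts come from
the entry's environment `henv` through `SameRegion H Hc`, the invariants are the body's for `Hc`, `Fc`. -/
theorem gih4_env_at_call {H Hc : Heap} {rest : List Obj} {frames : List (Nat × FrameLayout)} {F Fc : Forest} {R : Rd}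
    {e s : State} {base top lo : Nat} {Fl : FrameLayout} {mem : Mem} (henv : Env H rest frames F R e)
    (hreg : SameRegion H Hc)
    (hinv : HeapInv Hc rest ((base, Fl) :: frames) top mem) (hok : GifOK Hc Fc R mem)
    (hs : Mem.SameExcept [⟨lo, top⟩] mem s.mem) (hlo : 0x700000 ≤ lo) (htop : top ≤ (e.reg .rsp).toNat + 8)
    (hsp : (s.reg .rsp).toNat + 8 ≤ top) (h8 : (s.reg .rsp).toNat % 8 = 0) (hlo' : 0x700000 ≤ (s.reg .rsp).toNat + 8) :
    Env Hc rest ((base, Fl) :: frames) Fc R s := by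
  have hcur := henv.ctx.cursor_range henv.heap.inv.shadow
  have hhi := hinv.shadow.stack.hi
  have hoff := hinv.heap.offStack
  have hroom := hinv.heap.room
  have hun : ShadowUntouched mem s.mem := by
    apply hs.eqOn
    intro w hw
    have e := List.mem_singleton.mp hw
    rw [e]
    simp only
    omega
  have hinv' : HeapInv Hc rest ((base, Fl) :: frames) ((s.reg .rsp).toNat + 8) s.mem := by
    refine (hinv.sameExcept hun hs ?_).lower hsp (by omega) hlo'
    intro w hw
    have e := List.mem_singleton.mp hw
    rw [e]
    left
    simp only
    omega
  have hb : Hc.base = 0x800000 := by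
    rw [hreg.1]
    exact henv.heap.base
  have hl : Hc.limit = 0xC00000 := by
    rw [hreg.2]
    exact henv.heap.limit
  refine ⟨⟨hinv', hb, hl, henv.heap.text, henv.heap.offText⟩, henv.ctx.push base Fl, ?_⟩
  apply hok.sameExcept hinv.heap ⟨hcur.1, hcur.2.1⟩ hs
  intro w hw
  have e := List.mem_singleton.mp hw
  rw [e]
  apply Loose.stack hinv.heap
  · simp only
    omega
  · simp only
    omega
  · simp only
    omega

/-- **The pure step of the short-read arm** (dgif_lib.c:407-409): `GifFreeMapObject(gif.Image.ColorMap)` took the memory `mem` (the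
state invariant for `Hc`, `Fc` with `Fc.icm = some mp`) to `mem2` (its footprint `hs12`: stack, the state words of the two
headers, the shadow of the two objects; its post `hinv2`), then the code stored `Error` and NULL into `gif.Image.ColorMap`
(`hs23`, `hnull`). The heap's invariant and the state invariant hold for the heap without the two objects and the forest without
`icm`; the reader did not move. -/
theorem gih4_free_step {Hc : Heap} {rest : List Obj} {fr : List (Nat × FrameLayout)} {Fc : Forest} {R : Rd} {mp : Map}
    {top lo : Nat} {mem mem2 mem3 : Mem}
    (hinv : HeapInv Hc rest fr top mem) (hok : GifOK Hc Fc R mem) (hicm : Fc.icm = some mp)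
    (hcur : 0x700000 ≤ R.cur ∧ R.cur + 16 ≤ 0x800000) (hbase : Hc.base = 0x800000)
    (hlo : 0x700000 ≤ lo) (htop : top ≤ R.cur)
    (hinv2 : HeapInv ((Hc.release mp.colors).release mp.obj) rest fr top mem2)
    (hs12 : Mem.SameExcept
      [⟨lo, top⟩,
       ⟨mp.colors - 24, mp.colors - 16⟩,
       shadowSpan mp.colors (mp.colors + 3 * mp.count),
       ⟨mp.obj - 24, mp.obj - 16⟩,
       shadowSpan mp.obj (mp.obj + 24)] mem mem2)
    (hs23 : Mem.SameExcept
      [⟨lo, top⟩,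
       ⟨Fc.gif + 64, Fc.gif + 72⟩,
       ⟨Fc.gif + 96, Fc.gif + 104⟩] mem2 mem3)
    (hnull : rd mem3 (Fc.gif + 64) 8 = 0) :
    HeapInv ((Hc.release mp.colors).release mp.obj) rest fr top mem3 ∧
    GifOK ((Hc.release mp.colors).release mp.obj) ({ Fc with icm := none } : Forest) R mem3 ∧
    rem R mem3 = rem R mem := by
  have hheap := hinv.heap
  have hp : Placed Hc Fc.owned := hok.owns.placed hheap
  -- the two objects of the map: live objects of `Hc`
  obtain ⟨hl_obj, hl_col, hne, hcolors⟩ := hok.icm_live hicm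
  obtain ⟨c_obj, hlc_obj⟩ := hl_obj
  obtain ⟨c_col, hlc_col⟩ := hl_col
  -- where gif is
  have hgin := hok.owns.inside hheap (o := (Fc.gif, 120)) List.mem_cons_self
  simp only at hgin
  rw [hbase] at hgin
  have hgin1 := hgin.1
  have hgin2 := hgin.2.2.2.2
  clear hgin
  -- THE FREE: every window of its footprint is loose for the old heap
  have hloose12 : ∀ w, w ∈
      [(⟨lo, top⟩ : Span),
       ⟨mp.colors - 24, mp.colors - 16⟩,
       shadowSpan mp.colors (mp.colors + 3 * mp.count),
       ⟨mp.obj - 24, mp.obj - 16⟩,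
       shadowSpan mp.obj (mp.obj + 24)] → Loose Hc Fc R w := by
    intro w hw
    simp only [List.mem_cons, List.not_mem_nil, or_false] at hw
    rcases hw with rfl | rfl | rfl | rfl | rfl
    · apply Loose.stack hheap
      · simp only
        omega
      · simp only
        omega
      · simp only
        omega
    · apply Loose.header hheap hcur hlc_col
      · simp only
        omega
      · simp only
        omega
    · apply Loose.shadow hheap hcur.2
      simp only [shadowSpan]
      omega
    · apply Loose.header hheap hcur hlc_obj
      · simp only
        omega
      · simp only
        omega
    · apply Loose.shadow hheap hcur.2
      simp only [shadowSpan]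
      omega
  have hshape2 : Shape Fc R mem2 := hok.shape.sameExcept hp hheap hcur hs12 hloose12
  have hrem12 : rem R mem2 = rem R mem := rem_loose hs12 hloose12 hheap hp hcur
  have hp2 : Placed ((Hc.release mp.colors).release mp.obj) Fc.owned := (hp.release mp.colors).release mp.obj
  -- what is owned after the free: the forest without `icm`
  have howns : Owns ((Hc.release mp.colors).release mp.obj) ({ Fc with icm := none } : Forest).owned :=
    hok.owns.free_icm hicm
  have hgl : ((Hc.release mp.colors).release mp.obj).Live Fc.gif 120 := howns.live (Fc.gif, 120) List.mem_cons_self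
  -- THE TWO STORES: the stack (return addresses of the checks), `gif.Error`, `gif.Image.ColorMap`
  have hheap2 := hinv2.heap
  have hshape3 : Shape ({ Fc with icm := none } : Forest) R mem3 := by
    refine hshape2.set_icm hp2 hheap2 hcur hs23 ?_ none ?_
    · intro w hw
      simp only [List.mem_cons, List.not_mem_nil, or_false] at hw
      rcases hw with rfl | rfl | rfl
      · left
        apply Loose.stack hheap2
        · simp only
          omega
        · simp only
          omega
        · simp only
          omega
      · right
        simp only
        omega
      · left
        apply Loose.gifScalar
        right
        right
        simp only
        omega
    · show GifFileType.Image.ColorMap mem3 Fc.gif = 0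
      simp only [gfield]
      exact hnull
  have hun23 : ShadowUntouched mem2 mem3 := by
    apply hs23.eqOn
    intro w hw
    simp only [List.mem_cons, List.not_mem_nil, or_false] at hw
    rcases hw with rfl | rfl | rfl
    · simp only
      omega
    · simp only
      omega
    · simp only
      omega
  have hinv3 : HeapInv ((Hc.release mp.colors).release mp.obj) rest fr top mem3 := by
    obtain ⟨cg, hlcg⟩ := hgl
    have hsc := hheap2.size_le_cap hlcg
    simp only at hsc
    refine hinv2.sameExcept hun23 hs23 ?_
    intro w hw
    simp only [List.mem_cons, List.not_mem_nil, or_false] at hw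
    rcases hw with rfl | rfl | rfl
    · left
      left
      simp only [Heap.release_base]
      omega
    · right
      refine ⟨_, hlcg, ?_, ?_⟩
      · simp only
        omega
      · simp only
        omega
    · right
      refine ⟨_, hlcg, ?_, ?_⟩
      · simp only
        omega
      · simp only
        omega
  have hrem23 : rem R mem3 = rem R mem2 := by
    apply rem_sameExcept hs23 (by omega)
    intro w hw
    simp only [List.mem_cons, List.not_mem_nil, or_false] at hw
    rcases hw with rfl | rfl | rfl
    · simp only
      omega
    · simp only
      omega
    · simp only
      omega
  exact ⟨hinv3, ⟨howns, hshape3⟩, hrem23.trans hrem12⟩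

/-- **The footprint of a callee since the segment's start**: the segment stored into its stack window `[lo, top)` only (`h01`: the
pushed return address), the callee into its frame `[sp − 48, sp)` inside that window and into four more windows, whatever they are. -/
theorem gih4_free_same {lo top sp : Nat} {w1 w2 w3 w4 : Span} {m0 m1 m2 : Mem}
    (h01 : Mem.SameExcept [⟨lo, top⟩] m0 m1)
    (h12 : Mem.SameExcept [⟨sp - 48, sp⟩, w1, w2, w3, w4] m1 m2)
    (hlo : lo ≤ sp - 48) (htop : sp ≤ top) :
    Mem.SameExcept [⟨lo, top⟩, w1, w2, w3, w4] m0 m2 := by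
  have h01' : Mem.SameExcept [⟨lo, top⟩, w1, w2, w3, w4] m0 m1 := by
    apply h01.mono
    intro w hw a h1 h2
    have e := List.mem_singleton.mp hw
    rw [e] at h1 h2
    exact ⟨_, List.mem_cons_self, h1, h2⟩
  have h12' : Mem.SameExcept [⟨lo, top⟩, w1, w2, w3, w4] m1 m2 := by
    apply h12.mono
    intro w hw a h1 h2
    rcases List.mem_cons.mp hw with rfl | hw'
    · refine ⟨_, List.mem_cons_self, ?_, ?_⟩
      · simp only at h1 ⊢
        omega
      · simp only at h2 ⊢
        omega
    · exact ⟨w, List.mem_cons_of_mem _ hw', h1, h2⟩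
  exact h01'.trans h12'

/-- **The footprint of `GifFreeMapObject`, coarsely**: its frame, and the heap's region with its shadow (the state words of the two
headers and the shadow of the two objects lie there). No `shadowSpan` (no `/ 8`) is left: the form the frame tactics read. -/
theorem gih4_free_coarse {sp colors n obj : Nat} {m1 m2 : Mem}
    (h12 : Mem.SameExcept
      [⟨sp - 48, sp⟩,
       ⟨colors - 24, colors - 16⟩,
       shadowSpan colors (colors + n),
       ⟨obj - 24, obj - 16⟩,
       shadowSpan obj (obj + 24)] m1 m2)
    (hc1 : 0x800040 ≤ colors) (hc2 : colors + n + 32 ≤ 0xC00000) (ho1 : 0x800040 ≤ obj) (ho2 : obj + 24 + 32 ≤ 0xC00000) :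
    Mem.SameExcept [⟨sp - 48, sp⟩, ⟨0x800000, 0x1000020⟩] m1 m2 := by
  apply h12.mono
  intro w hw a h1 h2
  simp only [List.mem_cons, List.not_mem_nil, or_false] at hw
  rcases hw with rfl | rfl | rfl | rfl | rfl
  · exact ⟨_, List.mem_cons_self, h1, h2⟩
  · refine ⟨_, List.mem_cons_of_mem _ List.mem_cons_self, ?_, ?_⟩
    · simp only at h1 ⊢
      omega
    · simp only at h2 ⊢
      omega
  · refine ⟨_, List.mem_cons_of_mem _ List.mem_cons_self, ?_, ?_⟩
    · simp only [shadowSpan] at h1 ⊢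
      omega
    · simp only [shadowSpan] at h2 ⊢
      omega
  · refine ⟨_, List.mem_cons_of_mem _ List.mem_cons_self, ?_, ?_⟩
    · simp only at h1 ⊢
      omega
    · simp only at h2 ⊢
      omega
  · refine ⟨_, List.mem_cons_of_mem _ List.mem_cons_self, ?_, ?_⟩
    · simp only [shadowSpan] at h1 ⊢
      omega
    · simp only [shadowSpan] at h2 ⊢
      omega

/-- **108FFEH … the loop test … 108F4EH, or … the call of InternalRead … 109026H (ret24)** (dgif_lib.c:404 `i < ColorCount`, l.406
`InternalRead(GifFile, Buf, 3)`). The unchecked load of `gif.Image.ColorMap` (`mp.obj`), the checked load of its `ColorCount`; `jae`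
taken: to 108F4EH with the same heap and forest; otherwise `rsi = Buf = RA − 88` (the frame's object at base + 32), `edx = 3`,
`rdi = rbx = gif`. -/
theorem gih4_seg_head (Lay : Layout) (hLay : Lay.hi = 0x1000000) (μ : Microarch) (hμ : UserX.MicroOK μ) (u₀ : State)
    (hcode : HasCodeNat Lay u₀ Gif.L.DGifGetImageHeader.entry Gif.Code.code_DGifGetImageHeader.nat Gif.L.DGifGetImageHeader.size)
    (H : Heap) (rest : List Obj) (frames : List (Nat × FrameLayout)) (F : Forest) (R : Rd) (e : State) (ret : Word) (m : Nat)
    (Hc : Heap) (Fc : Forest)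
    (h_InternalRead : Calls Lay μ ProgX.Base.WayInv (ProgX.Base.conv u₀) Gif.L.InternalRead.entry
      (Gif.Spec.InternalRead.spec Hc rest (DGifGetImageHeader.framesIn frames e) Fc R 3))
    (h_asan_load4_noabort : Asan.SmallCheck Lay μ ProgX.Base.WayInv (ProgX.Base.CodeOK u₀) [.rax, .rcx, .rdx] 4
      ProgX.Base.L.__asan_load4_noabort.entry)
    (v : State) (hat : DGifGetImageHeader.Head m H rest frames F R Hc Fc u₀ e ret v) :
    ReachVia Lay μ ProgX.Base.WayInv v (fun w =>
      DGifGetImageHeader.Mid Gif.L.DGifGetImageHeader.at_108f4e H rest frames F R Hc Fc u₀ e ret w ∨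
      gih4_AtRet24 m H rest frames F R Hc Fc u₀ e ret w) := by
  -- THE PRELUDE: the entry assertion `Head` = `Mid` (`Body` + `r12 = pv`) + the loop's facts
  obtain ⟨⟨hbody, c_r12n⟩, mp, hicm, hi_le, hmeas⟩ := hat
  have he := hbody.entry
  v_entry he
  obtain ⟨henv, hrdi⟩ := hbody.pre
  have w_rip := hbody.rip
  have c_rsp : v.reg .rsp = e.reg .rsp - 136 := hbody.rsp
  have c_rbx : v.reg .rbx = e.reg .rdi := hbody.rbx
  have w_kept : RegsKept [.rsp] v v := RegsKept.refl _ _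
  have w_eq : Mem.EqOn ProgX.Base.L.textLo ProgX.Base.L.textHi u₀.mem v.mem := ProgX.Base.conv_code_eqOn hbody.code
  have hdf := (show abiInv _ from hbody.abi).1
  have hmx := (show abiInv _ from hbody.abi).2
  have hsse := ProgX.Base.sseOK_of_abiInv hbody.abi
  -- the slots and the footprint that `Body` at the exits states again
  have k_r15 : v.mem.readLE (e.reg .rsp - 8) 8 = (e.reg .r15).toNat := hbody.slot_r15
  have k_r14 : v.mem.readLE (e.reg .rsp - 16) 8 = (e.reg .r14).toNat := hbody.slot_r14
  have k_r13 : v.mem.readLE (e.reg .rsp - 24) 8 = (e.reg .r13).toNat := hbody.slot_r13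
  have k_r12 : v.mem.readLE (e.reg .rsp - 32) 8 = (e.reg .r12).toNat := hbody.slot_r12
  have k_rbp : v.mem.readLE (e.reg .rsp - 40) 8 = (e.reg .rbp).toNat := hbody.slot_rbp
  have k_rbx : v.mem.readLE (e.reg .rsp - 48) 8 = (e.reg .rbx).toNat := hbody.slot_rbx
  have k_ra : UInt64.ofNat (v.mem.readLE (e.reg .rsp) 8) = ret := hbody.slot_ra
  have hsame : Mem.SameExcept
    [⟨(e.reg .rsp).toNat - 448, (e.reg .rsp).toNat⟩,
     shadowSpan ((e.reg .rsp).toNat - 120) ((e.reg .rsp).toNat - 56),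
     ⟨0x800000, 0x1000020⟩,
     ⟨R.cur, R.cur + 8⟩] e.mem v.mem := hbody.same
  -- where the cursor, gif and the map object are, as numbers
  have hcur := henv.ctx.cursor_range henv.heap.inv.shadow
  have hbase : Hc.base = 0x800000 := by
    rw [hbody.region.1]
    exact henv.heap.base
  have hgeq : Fc.gif = F.gif := hbody.forest.1
  have hgin := hbody.ok.owns.inside hbody.inv.heap (o := (Fc.gif, 120)) List.mem_cons_self
  simp only at hgin
  rw [hbase] at hgin
  have hgin1 := hgin.1
  have hgin2 := hgin.2.2.2.2
  clear hgin
  -- CM3, CM1: `gif.Image.ColorMap = mp.obj`, `mp.obj->ColorCount = mp.count`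
  have hshape := hbody.ok.shape.icm
  rw [hicm] at hshape
  obtain ⟨hptr, hcnt, hcol, hcnt1, hcnt256⟩ := hshape
  simp only [gfield] at hptr hcnt
  have hmem_icm : (mp.obj, 24) ∈ Fc.owned := Forest.mem_owned_icm (by rw [hicm]; exact List.mem_cons_self)
  have hmin := hbody.ok.owns.inside hbody.inv.heap (o := (mp.obj, 24)) hmem_icm
  simp only at hmin
  rw [hbase] at hmin
  have hmin1 := hmin.1
  have hmin2 := hmin.2.2.2.2
  clear hmin
  -- the two loads, as facts in the walker's form; the first is NOT checked by the code (the field was checked at 108FE6H)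
  have l_icm : v.mem.readLE (e.reg .rdi + 0x40) 8 = mp.obj := by
    rw [rd_eq_readLE v.mem (e.reg .rdi + 0x40) (Fc.gif + 64) 8 (by u_omega)]
    exact hptr
  have hh_icm : Lay.Has (e.reg .rdi + 0x40) 8 := by
    unfold Layout.Has Layout.lo
    rw [hLay]
    u_omega
  have l_cnt : v.mem.readLE (UInt64.ofNat mp.obj) 4 = mp.count := by
    rw [rd_eq_readLE v.mem (UInt64.ofNat mp.obj) mp.obj 4 (by u_omega)]
    exact hcnt
  -- the counter `i` as a variable (the branch fact of `cmp r14d, [r13]` speaks of it)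
  obtain ⟨i, c_r14⟩ : ∃ i, v.reg .r14 = i := ⟨_, rfl⟩
  rw [c_r14] at hi_le hmeas
  -- THE WALK, to the loop's exit or to the call's return address
  u_walk hcode [hμ.vendor] until [Gif.L.DGifGetImageHeader.ret24, Gif.L.DGifGetImageHeader.at_108f4e]
    span [ProgX.Base.L.textLo, ProgX.Base.L.textHi] side (v_side)
  case check_109005 =>
    -- dgif_lib.c:404 the load of `ColorCount`: 4 bytes at the base of the live map object
    have hun : ShadowUntouched v.mem s_109005.mem := by v_untouched
    have hml : LiveIn (Hc.liveObjs ++ rest) (DGifGetImageHeader.framesIn frames e) mp.obj 24 :=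
      (hbody.ok.owns.live (mp.obj, 24) hmem_icm).liveIn rest _ (Nat.le_refl _) (Nat.le_refl _)
    exact hml.accSmall hbody.inv.shadow hun _ 4 (by decide) (by u_omega) (by u_omega)
  case call_inv =>
    v_inv
  case pre_109021 =>
    -- INTERNALREAD'S PRECONDITION: the environment for the frame list with the own frame in front (only return addresses were
    -- pushed since `v`), for the PRESENT heap and forest
    have hs : Mem.SameExcept [⟨(e.reg .rsp).toNat - 448, (e.reg .rsp).toNat - 136⟩] v.mem s_109021.mem := by
      rw [w_mem]
      u_same
    have henv' : Env Hc rest (DGifGetImageHeader.framesIn frames e) Fc R s_109021 := by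
      refine gih4_env_at_call henv hbody.region hbody.inv hbody.ok hs (by omega) (by omega) ?_ ?_ ?_
      · rw [w_rsp]
        u_omega
      · rw [w_rsp]
        u_omega
      · rw [w_rsp]
        u_omega
    -- the buffer is the frame's object `Buf` (`[rsp + 0x30]` = base + 32, 3 bytes), named by its numbers
    have ho : (⟨(e.reg .rsp).toNat - 120 + 32, 3, .stack⟩ : Obj) ∈
        Gif.Frames.DGifGetImageHeader.objsAt ((e.reg .rsp).toNat - 120) := List.mem_cons_self
    have hsz : Gif.Frames.DGifGetImageHeader.size = 64 := rfl
    have hb : (e.reg .rsp).toNat - 120 + Gif.Frames.DGifGetImageHeader.size ≤ (e.reg .rsp).toNat + 8 := by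
      rw [hsz]
      omega
    have hbuf : BufOK Hc rest (DGifGetImageHeader.framesIn frames e) Fc R (s_109021.reg .rsi).toNat 3 := by
      apply BufOK.own henv.heap henv.ctx hbody.inv hb ho
      · rw [w_rsi]
        u_omega
      · rw [w_rsi]
        u_omega
    refine ⟨henv', ?_, ?_, by decide, by decide, hbuf⟩
    · rw [w_rdi, hgeq]
      exact hrdi
    · rw [w_rdx]
      decide
  · -- 0x108f4e FROM 0x10900e (`jae` taken): all colours are read. Only the check's return address was stored
    obtain ⟨hinvA, hokA, hremA⟩ := store_stack hbody.inv hbody.ok ⟨hcur.1, hcur.2.1⟩ (e.reg .rsp - 144) 8 1085450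
      (by u_omega) (by u_omega)
    rw [← w_mem] at hinvA hokA hremA
    have hbody1 : DGifGetImageHeader.Body Gif.L.DGifGetImageHeader.at_108f4e H rest frames F R Hc Fc u₀ e ret s_10900e := {
      entry := hbody.entry
      pre := hbody.pre
      rip := w_rip
      rsp := w_rsp
      rbx := (w_kept.get .rbx rfl).trans hbody.rbx
      rbp := (w_kept.get .rbp rfl).trans hbody.rbp
      slot_r15 := by
        rw [w_mem]
        u_frame k_r15
      slot_r14 := by
        rw [w_mem]
        u_frame k_r14
      slot_r13 := by
        rw [w_mem]
        u_frame k_r13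
      slot_r12 := by
        rw [w_mem]
        u_frame k_r12
      slot_rbp := by
        rw [w_mem]
        u_frame k_rbp
      slot_rbx := by
        rw [w_mem]
        u_frame k_rbx
      slot_ra := by
        rw [w_mem]
        u_frame k_ra
      inv := hinvA
      region := hbody.region
      forest := hbody.forest
      ok := hokA
      rem := by
        rw [hremA]
        exact hbody.rem
      same := by
        rw [w_mem]
        u_same
      code := ProgX.Base.conv_code_in w_eq
      abi := by
        refine ProgX.Base.abiInv_of ?_ ?_
        · rw [w_flags]
          simp only [X86.User.df_setStatus]
          exact w_df_109005
        · rw [w_mxcsr]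
          exact hmx
    }
    refine ReachVia.done (Or.inl ?_)
    exact {
      body := hbody1
      r12 := by
        rw [w_kept.get .r12 rfl]
        exact c_r12n
    }
  · -- 0x109026 (ret24): INTERNALREAD HAS RETURNED
    obtain ⟨k, hk1, hk2, hk3, hk4, hk5, hback⟩ :
      ReadPost Hc rest (DGifGetImageHeader.framesIn frames e) Fc R 3 s_109021 s_109021r := w_post
    -- the reader at InternalRead's entry is the segment's: only return addresses were pushed
    have hs0 : Mem.SameExcept [⟨(e.reg .rsp).toNat - 448, (e.reg .rsp).toNat - 136⟩] v.mem s_109021.mem := by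
      rw [w_mem_109021]
      u_same
    have hrem0 : rem R s_109021.mem = rem R v.mem := by
      apply rem_sameExcept hs0 (by omega)
      intro w hw
      have e := List.mem_singleton.mp hw
      rw [e]
      simp only
      omega
    have e_top : (s_109021.reg .rsp).toNat + 8 = (e.reg .rsp).toNat - 136 := by
      rw [w_rsp_109021]
      u_omega
    -- `i < count`: the branch fact of `cmp r14d, [r13] ; jae` not taken
    have hlt : i.toNat < mp.count := by
      rw [toNat_part32] at hbr_10900e
      omega
    -- the callee's footprint in terms of `v`
    v_after_call w_rsp_109021 w_mem_109021
    simp only [w_rsi_109021] at w_same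
    -- THE SLOTS AND THE RETURN ADDRESS, over the pushed return address and through InternalRead's footprint
    have hp15 : s_109021.mem.readLE (e.reg .rsp - 8) 8 = (e.reg .r15).toNat := by
      rw [w_mem_109021]
      u_frame k_r15
    rw [w_mem_109021] at hp15
    have hs15 : s_109021r.mem.readLE (e.reg .rsp - 8) 8 = (e.reg .r15).toNat := by u_frame hp15
    have hp14 : s_109021.mem.readLE (e.reg .rsp - 16) 8 = (e.reg .r14).toNat := by
      rw [w_mem_109021]
      u_frame k_r14
    rw [w_mem_109021] at hp14
    have hs14 : s_109021r.mem.readLE (e.reg .rsp - 16) 8 = (e.reg .r14).toNat := by u_frame hp14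
    have hp13 : s_109021.mem.readLE (e.reg .rsp - 24) 8 = (e.reg .r13).toNat := by
      rw [w_mem_109021]
      u_frame k_r13
    rw [w_mem_109021] at hp13
    have hs13 : s_109021r.mem.readLE (e.reg .rsp - 24) 8 = (e.reg .r13).toNat := by u_frame hp13
    have hp12 : s_109021.mem.readLE (e.reg .rsp - 32) 8 = (e.reg .r12).toNat := by
      rw [w_mem_109021]
      u_frame k_r12
    rw [w_mem_109021] at hp12
    have hs12 : s_109021r.mem.readLE (e.reg .rsp - 32) 8 = (e.reg .r12).toNat := by u_frame hp12
    have hpbp : s_109021.mem.readLE (e.reg .rsp - 40) 8 = (e.reg .rbp).toNat := by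
      rw [w_mem_109021]
      u_frame k_rbp
    rw [w_mem_109021] at hpbp
    have hsbp : s_109021r.mem.readLE (e.reg .rsp - 40) 8 = (e.reg .rbp).toNat := by u_frame hpbp
    have hpbx : s_109021.mem.readLE (e.reg .rsp - 48) 8 = (e.reg .rbx).toNat := by
      rw [w_mem_109021]
      u_frame k_rbx
    rw [w_mem_109021] at hpbx
    have hsbx : s_109021r.mem.readLE (e.reg .rsp - 48) 8 = (e.reg .rbx).toNat := by u_frame hpbx
    have hpra : UInt64.ofNat (s_109021.mem.readLE (e.reg .rsp) 8) = ret := by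
      rw [w_mem_109021]
      u_frame k_ra
    rw [w_mem_109021] at hpra
    have hsra : UInt64.ofNat (s_109021r.mem.readLE (e.reg .rsp) 8) = ret := by u_frame hpra
    -- the footprint since the entry: InternalRead's windows (`Buf` in the own frame, the cursor) lie inside the function's
    have hsame1 : Mem.SameExcept
      [⟨(e.reg .rsp).toNat - 448, (e.reg .rsp).toNat⟩,
       shadowSpan ((e.reg .rsp).toNat - 120) ((e.reg .rsp).toNat - 56),
       ⟨0x800000, 0x1000020⟩,
       ⟨R.cur, R.cur + 8⟩] e.mem s_109021r.mem := by u_same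
    -- the heap's invariant comes back with the clean stack at the callee's `rsp + 8` = the body's `rsp`
    have hinv1 : HeapInv Hc rest (DGifGetImageHeader.framesIn frames e) ((e.reg .rsp).toNat - 136) s_109021r.mem := by
      rw [← e_top]
      exact hback.inv
    have hbody1 : DGifGetImageHeader.Body Gif.L.DGifGetImageHeader.ret24 H rest frames F R Hc Fc u₀ e ret s_109021r := {
      entry := hbody.entry
      pre := hbody.pre
      rip := w_rip
      rsp := w_rsp
      rbx := (w_kept.get .rbx rfl).trans hbody.rbx
      rbp := (w_kept.get .rbp rfl).trans hbody.rbp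
      slot_r15 := hs15
      slot_r14 := hs14
      slot_r13 := hs13
      slot_r12 := hs12
      slot_rbp := hsbp
      slot_rbx := hsbx
      slot_ra := hsra
      inv := hinv1
      region := hbody.region
      forest := hbody.forest
      ok := hback.ok
      rem := by
        refine Nat.le_trans hback.rem ?_
        rw [hrem0]
        exact hbody.rem
      same := hsame1
      code := w_code
      abi := w_inv
    }
    refine ReachVia.done (Or.inr ?_)
    exact {
      mid := {
        body := hbody1
        r12 := by
          rw [w_kept.get .r12 rfl]
          exact c_r12n
      }
      loop := by
        refine ⟨mp, hicm, ?_, ?_⟩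
        · rw [w_kept.get .r14 rfl, c_r14]
          exact hlt
        · rw [w_kept.get .r14 rfl, c_r14]
          exact hmeas
    }

/-- **109026H (ret24) … 10902FH, or 1090E3H … 108E78H** (dgif_lib.c:406-410). `cmp eax, 3`: three bytes were read: on to the stores
of the colour (`Colour`, nothing stored since `ret24`). A short read: the checked load of `gif.Image.ColorMap` (`mp.obj`),
`GifFreeMapObject` of it (the non-NULL arm of its contract: both objects freed), the checked stores of `Error = 102` and of NULL to
`gif.Image.ColorMap` — gif is live in the heap without the map —, `r13d = 0`: `Done` for `(Hc.release mp.colors).release mp.obj` and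
the forest with `icm := none` (`gih4_free_step`). The assertion `gih4_AtRet24` is taken apart by the caller: the contract of
GifFreeMapObject is instantiated with the map `mp` of its `loop` clause. -/
theorem gih4_seg_tail (Lay : Layout) (hLay : Lay.hi = 0x1000000) (μ : Microarch) (hμ : UserX.MicroOK μ) (u₀ : State)
    (hcode : HasCodeNat Lay u₀ Gif.L.DGifGetImageHeader.entry Gif.Code.code_DGifGetImageHeader.nat Gif.L.DGifGetImageHeader.size)
    (H : Heap) (rest : List Obj) (frames : List (Nat × FrameLayout)) (F : Forest) (R : Rd) (e : State) (ret : Word) (m : Nat)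
    (Hc : Heap) (Fc : Forest) (mp : Map)
    (h_GifFreeMapObject : Calls Lay μ ProgX.Base.WayInv (ProgX.Base.conv u₀) Gif.L.GifFreeMapObject.entry
      (Gif.Spec.GifFreeMapObject.spec Hc rest (DGifGetImageHeader.framesIn frames e) mp.colors (3 * mp.count)))
    (h_asan_load8_noabort : Asan.SmallCheck Lay μ ProgX.Base.WayInv (ProgX.Base.CodeOK u₀) [.rax, .rcx, .rdx] 8
      ProgX.Base.L.__asan_load8_noabort.entry)
    (h_asan_store4_noabort : Asan.SmallCheck Lay μ ProgX.Base.WayInv (ProgX.Base.CodeOK u₀) [.rax, .rcx, .rdx] 4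
      ProgX.Base.L.__asan_store4_noabort.entry)
    (h_asan_store8_noabort : Asan.SmallCheck Lay μ ProgX.Base.WayInv (ProgX.Base.CodeOK u₀) [.rax, .rcx, .rdx] 8
      ProgX.Base.L.__asan_store8_noabort.entry)
    (v : State) (hmid : DGifGetImageHeader.Mid Gif.L.DGifGetImageHeader.ret24 H rest frames F R Hc Fc u₀ e ret v)
    (hicm : Fc.icm = some mp) (hi_lt : (v.reg .r14).toNat < mp.count) (hmeas : mp.count - (v.reg .r14).toNat = m) :
    ReachVia Lay μ ProgX.Base.WayInv v (fun w =>
      DGifGetImageHeader.Colour m H rest frames F R Hc Fc u₀ e ret w ∨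
      ∃ (H' : Heap) (F' : Forest), DGifGetImageHeader.Done H rest frames F R H' F' u₀ e ret w) := by
  -- THE PRELUDE: as in `gih4_seg_head`
  obtain ⟨hbody, c_r12n⟩ := hmid
  have he := hbody.entry
  v_entry he
  obtain ⟨henv, hrdi⟩ := hbody.pre
  have w_rip := hbody.rip
  have c_rsp : v.reg .rsp = e.reg .rsp - 136 := hbody.rsp
  have c_rbx : v.reg .rbx = e.reg .rdi := hbody.rbx
  -- `eax` as a variable `z` (the branch fact of `cmp eax, 3` speaks of it)
  obtain ⟨z, c_rax⟩ : ∃ z, v.reg .rax = z := ⟨_, rfl⟩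
  have w_kept : RegsKept [.rsp] v v := RegsKept.refl _ _
  have w_eq : Mem.EqOn ProgX.Base.L.textLo ProgX.Base.L.textHi u₀.mem v.mem := ProgX.Base.conv_code_eqOn hbody.code
  have hdf := (show abiInv _ from hbody.abi).1
  have hmx := (show abiInv _ from hbody.abi).2
  have hsse := ProgX.Base.sseOK_of_abiInv hbody.abi
  have k_r15 : v.mem.readLE (e.reg .rsp - 8) 8 = (e.reg .r15).toNat := hbody.slot_r15
  have k_r14 : v.mem.readLE (e.reg .rsp - 16) 8 = (e.reg .r14).toNat := hbody.slot_r14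
  have k_r13 : v.mem.readLE (e.reg .rsp - 24) 8 = (e.reg .r13).toNat := hbody.slot_r13
  have k_r12 : v.mem.readLE (e.reg .rsp - 32) 8 = (e.reg .r12).toNat := hbody.slot_r12
  have k_rbp : v.mem.readLE (e.reg .rsp - 40) 8 = (e.reg .rbp).toNat := hbody.slot_rbp
  have k_rbx : v.mem.readLE (e.reg .rsp - 48) 8 = (e.reg .rbx).toNat := hbody.slot_rbx
  have k_ra : UInt64.ofNat (v.mem.readLE (e.reg .rsp) 8) = ret := hbody.slot_ra
  have hsame : Mem.SameExcept
    [⟨(e.reg .rsp).toNat - 448, (e.reg .rsp).toNat⟩,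
     shadowSpan ((e.reg .rsp).toNat - 120) ((e.reg .rsp).toNat - 56),
     ⟨0x800000, 0x1000020⟩,
     ⟨R.cur, R.cur + 8⟩] e.mem v.mem := hbody.same
  have hcur := henv.ctx.cursor_range henv.heap.inv.shadow
  have hbase : Hc.base = 0x800000 := by
    rw [hbody.region.1]
    exact henv.heap.base
  have hgeq : Fc.gif = F.gif := hbody.forest.1
  have hgin := hbody.ok.owns.inside hbody.inv.heap (o := (Fc.gif, 120)) List.mem_cons_self
  simp only at hgin
  rw [hbase] at hgin
  have hgin1 := hgin.1
  have hgin2 := hgin.2.2.2.2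
  clear hgin
  have hshape := hbody.ok.shape.icm
  rw [hicm] at hshape
  obtain ⟨hptr, hcnt, hcol, hcnt1, hcnt256⟩ := hshape
  simp only [gfield] at hptr hcnt
  have hmem_icm : (mp.obj, 24) ∈ Fc.owned := Forest.mem_owned_icm (by rw [hicm]; exact List.mem_cons_self)
  have hmin := hbody.ok.owns.inside hbody.inv.heap (o := (mp.obj, 24)) hmem_icm
  simp only at hmin
  rw [hbase] at hmin
  have hmin1 := hmin.1
  have hmin2 := hmin.2.2.2.2
  clear hmin
  have l_icm : v.mem.readLE (e.reg .rdi + 0x40) 8 = mp.obj := by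
    rw [rd_eq_readLE v.mem (e.reg .rdi + 0x40) (Fc.gif + 64) 8 (by u_omega)]
    exact hptr
  -- gif is live under the body's frames: what the first check goal asks
  have hgl : LiveIn (Hc.liveObjs ++ rest) (DGifGetImageHeader.framesIn frames e) Fc.gif 120 :=
    hbody.ok.gif_live.liveIn rest _ (Nat.le_refl _) (Nat.le_refl _)
  -- THE WALK, both arms: to 10902FH, or to the return of GifFreeMapObject
  u_walk hcode [hμ.vendor] until [Gif.L.DGifGetImageHeader.at_10902f, Gif.L.DGifGetImageHeader.at_108e78]
    span [ProgX.Base.L.textLo, ProgX.Base.L.textHi] side (v_side)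
  case check_1090ea =>
    -- dgif_lib.c:407 the load of `gif.Image.ColorMap`: 8 bytes inside gif
    have hun : ShadowUntouched v.mem s_1090ea.mem := by v_untouched
    exact hgl.accSmall hbody.inv.shadow hun _ 8 (by decide) (by u_omega) (by u_omega)
  case call_inv =>
    v_inv
  case pre_1090f3 =>
    -- GIFFREEMAPOBJECT'S PRECONDITION: `HeapPre` of the present heap with the own frame in front; the argument is the map object
    have hs : Mem.SameExcept [⟨(e.reg .rsp).toNat - 448, (e.reg .rsp).toNat - 136⟩] v.mem s_1090f3.mem := by
      rw [w_mem]
      u_same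
    have henv' : Env Hc rest (DGifGetImageHeader.framesIn frames e) Fc R s_1090f3 := by
      refine gih4_env_at_call henv hbody.region hbody.inv hbody.ok hs (by omega) (by omega) ?_ ?_ ?_
      · rw [w_rsp]
        u_omega
      · rw [w_rsp]
        u_omega
      · rw [w_rsp]
        u_omega
    obtain ⟨hl1, hl2, hne, hcolf⟩ := henv'.ok.icm_live hicm
    have e_obj : (s_1090f3.reg .rdi).toNat = mp.obj := by
      rw [w_rdi]
      u_omega
    refine ⟨henv'.heap, Or.inr ?_⟩
    rw [e_obj]
    exact ⟨hl1, hl2, hne, hcolf⟩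
  case cont =>
    -- 0x1090f8 (ret34): GIFFREEMAPOBJECT HAS RETURNED: both objects of the map are freed
    have e_obj : (s_1090f3.reg .rdi).toNat = mp.obj := by
      rw [w_rdi_1090f3]
      u_omega
    have e_top : (s_1090f3.reg .rsp).toNat + 8 = (e.reg .rsp).toNat - 136 := by
      rw [w_rsp_1090f3]
      u_omega
    have hpost : _ ∧ _ := w_post
    have hinv2 := hpost.2 (by rw [e_obj]; omega)
    rw [e_obj, e_top] at hinv2
    clear hpost w_post
    -- what is owned now: the forest without `icm`; gif is still live
    have howns2 : Owns ((Hc.release mp.colors).release mp.obj) ({ Fc with icm := none } : Forest).owned :=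
      hbody.ok.owns.free_icm hicm
    have hgl2 : LiveIn (((Hc.release mp.colors).release mp.obj).liveObjs ++ rest) (DGifGetImageHeader.framesIn frames e)
        Fc.gif 120 :=
      (howns2.live (Fc.gif, 120) List.mem_cons_self).liveIn rest _ (Nat.le_refl _) (Nat.le_refl _)
    -- where the two objects are
    have hmem_col : (mp.colors, 3 * mp.count) ∈ Fc.owned :=
      Forest.mem_owned_icm (by rw [hicm]; exact List.mem_cons_of_mem _ List.mem_cons_self)
    have hcin := hbody.ok.owns.inside hbody.inv.heap (o := (mp.colors, 3 * mp.count)) hmem_col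
    simp only at hcin
    rw [hbase] at hcin
    have hcin1 := hcin.1
    have hcin2 := hcin.2.2.2.2
    clear hcin
    -- the callee's footprint in terms of `v`
    v_after_call w_rsp_1090f3 w_mem_1090f3
    simp only [w_rdi_1090f3] at w_same
    have e_objw : (UInt64.ofNat mp.obj).toNat = mp.obj := by u_omega
    rw [e_objw] at w_same
    -- the footprint of the free since `v`, for the pure step (the five windows as the contract has them) …
    have h01 : Mem.SameExcept [⟨(e.reg .rsp).toNat - 448, (e.reg .rsp).toNat - 136⟩] v.mem
        (v.mem.writeLE (e.reg .rsp - 144) 8 1085688) := by u_same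
    have hfree := gih4_free_same h01 w_same (by u_omega) (by u_omega)
    -- … and coarsely, for the frame tactics (no `shadowSpan`)
    replace w_same := gih4_free_coarse w_same (by omega) (by omega) (by omega) (by omega)
    -- THE SLOTS AND THE RETURN ADDRESS, over the pushed return address and through GifFreeMapObject's footprint
    have hp15 : s_1090f3.mem.readLE (e.reg .rsp - 8) 8 = (e.reg .r15).toNat := by
      rw [w_mem_1090f3]
      u_frame k_r15
    rw [w_mem_1090f3] at hp15
    have hs15 : s_1090f3r.mem.readLE (e.reg .rsp - 8) 8 = (e.reg .r15).toNat := by u_frame hp15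
    have hp14 : s_1090f3.mem.readLE (e.reg .rsp - 16) 8 = (e.reg .r14).toNat := by
      rw [w_mem_1090f3]
      u_frame k_r14
    rw [w_mem_1090f3] at hp14
    have hs14 : s_1090f3r.mem.readLE (e.reg .rsp - 16) 8 = (e.reg .r14).toNat := by u_frame hp14
    have hp13 : s_1090f3.mem.readLE (e.reg .rsp - 24) 8 = (e.reg .r13).toNat := by
      rw [w_mem_1090f3]
      u_frame k_r13
    rw [w_mem_1090f3] at hp13
    have hs13 : s_1090f3r.mem.readLE (e.reg .rsp - 24) 8 = (e.reg .r13).toNat := by u_frame hp13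
    have hp12 : s_1090f3.mem.readLE (e.reg .rsp - 32) 8 = (e.reg .r12).toNat := by
      rw [w_mem_1090f3]
      u_frame k_r12
    rw [w_mem_1090f3] at hp12
    have hs12 : s_1090f3r.mem.readLE (e.reg .rsp - 32) 8 = (e.reg .r12).toNat := by u_frame hp12
    have hpbp : s_1090f3.mem.readLE (e.reg .rsp - 40) 8 = (e.reg .rbp).toNat := by
      rw [w_mem_1090f3]
      u_frame k_rbp
    rw [w_mem_1090f3] at hpbp
    have hsbp : s_1090f3r.mem.readLE (e.reg .rsp - 40) 8 = (e.reg .rbp).toNat := by u_frame hpbp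
    have hpbx : s_1090f3.mem.readLE (e.reg .rsp - 48) 8 = (e.reg .rbx).toNat := by
      rw [w_mem_1090f3]
      u_frame k_rbx
    rw [w_mem_1090f3] at hpbx
    have hsbx : s_1090f3r.mem.readLE (e.reg .rsp - 48) 8 = (e.reg .rbx).toNat := by u_frame hpbx
    have hpra : UInt64.ofNat (s_1090f3.mem.readLE (e.reg .rsp) 8) = ret := by
      rw [w_mem_1090f3]
      u_frame k_ra
    rw [w_mem_1090f3] at hpra
    have hsra : UInt64.ofNat (s_1090f3r.mem.readLE (e.reg .rsp) 8) = ret := by u_frame hpra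
    -- the function's footprint since the entry, at `ret34`
    have hsame1 : Mem.SameExcept
      [⟨(e.reg .rsp).toNat - 448, (e.reg .rsp).toNat⟩,
       shadowSpan ((e.reg .rsp).toNat - 120) ((e.reg .rsp).toNat - 56),
       ⟨0x800000, 0x1000020⟩,
       ⟨R.cur, R.cur + 8⟩] e.mem s_1090f3r.mem := by u_same
    clear hp15 hp14 hp13 hp12 hpbp hpbx hpra h01 w_same
    -- THE WALK GOES ON: the checked stores of `Error` (l.408) and of NULL (l.409), `r13d = 0`, to the epilogue
    u_walk hcode [hμ.vendor] until [Gif.L.DGifGetImageHeader.at_108e78]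
      span [ProgX.Base.L.textLo, ProgX.Base.L.textHi] side (v_side)
    case check_1090fc =>
      -- dgif_lib.c:408 the store of `gif.Error`: 4 bytes inside gif, live in the heap without the map
      have hun : ShadowUntouched s_1090f3r.mem s_1090fc.mem := by v_untouched
      exact hgl2.accSmall hinv2.shadow hun _ 4 (by decide) (by u_omega) (by u_omega)
    case check_10910b =>
      -- dgif_lib.c:409 the store of NULL to `gif.Image.ColorMap`: 8 bytes inside gif
      have hun : ShadowUntouched s_1090f3r.mem s_10910b.mem := by v_untouched
      exact hgl2.accSmall hinv2.shadow hun _ 8 (by decide) (by u_omega) (by u_omega)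
    -- 0x108e78 FROM 0x10911e: `Error` and NULL are stored, `r13d = 0`
    -- the stores since `ret34`: two return addresses of checks (stack), `gif.Error`, `gif.Image.ColorMap`
    have hs23 : Mem.SameExcept
      [⟨(e.reg .rsp).toNat - 448, (e.reg .rsp).toNat - 136⟩,
       ⟨Fc.gif + 64, Fc.gif + 72⟩,
       ⟨Fc.gif + 96, Fc.gif + 104⟩] s_1090f3r.mem s_10911e.mem := by
      rw [w_mem]
      u_same
    have hnull : rd s_10911e.mem (Fc.gif + 64) 8 = 0 := by
      rw [w_mem, rd_writeLE_same _ (e.reg .rdi + 64) 8 0 _ (by u_omega) (by decide)]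
    -- THE PURE STEP: the invariants for the heap without the two objects and the forest without `icm`
    obtain ⟨hinv3, hok3, hrem3⟩ := gih4_free_step hbody.inv hbody.ok hicm ⟨hcur.1, hcur.2.1⟩ hbase (by omega) (by omega)
      hinv2 hfree hs23 hnull
    -- THE EXIT ASSERTION: `Body` at 0x108e78 for the new heap and forest …
    have hbody1 : DGifGetImageHeader.Body Gif.L.DGifGetImageHeader.at_108e78 H rest frames F R
        ((Hc.release mp.colors).release mp.obj) ({ Fc with icm := none } : Forest) u₀ e ret s_10911e := {
      entry := hbody.entry
      pre := hbody.pre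
      rip := w_rip
      rsp := w_rsp
      rbx := (w_kept.get .rbx rfl).trans hbody.rbx
      rbp := (w_kept.get .rbp rfl).trans hbody.rbp
      slot_r15 := by
        rw [w_mem]
        u_frame hs15
      slot_r14 := by
        rw [w_mem]
        u_frame hs14
      slot_r13 := by
        rw [w_mem]
        u_frame hs13
      slot_r12 := by
        rw [w_mem]
        u_frame hs12
      slot_rbp := by
        rw [w_mem]
        u_frame hsbp
      slot_rbx := by
        rw [w_mem]
        u_frame hsbx
      slot_ra := by
        rw [w_mem]
        u_frame hsra
      inv := hinv3
      region := hbody.region.trans ((SameRegion.release Hc mp.colors).trans (SameRegion.release _ mp.obj))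
      forest := hbody.forest
      ok := hok3
      rem := by
        rw [hrem3]
        exact hbody.rem
      same := by
        rw [w_mem]
        u_same
      code := ProgX.Base.conv_code_in w_eq
      abi := by
        refine ProgX.Base.abiInv_of ?_ ?_
        · rw [w_flags]
          exact w_df_10910b
        · rw [w_mxcsr]
          exact w_mx
    }
    -- … and the result: GIF_ERROR in `r13d`
    refine ReachVia.done (Or.inr ⟨(Hc.release mp.colors).release mp.obj, ({ Fc with icm := none } : Forest), ?_⟩)
    exact {
      body := hbody1
      res := by
        right
        rw [w_r13]
        decide
      lz := by
        intro h1
        rw [w_r13] at h1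
        exact absurd h1 (by decide)
    }
  case cont =>
    -- 0x10902f FROM 0x109029 (`eax = 3`): one colour was read; nothing was stored since `ret24`
    have hbody1 : DGifGetImageHeader.Body Gif.L.DGifGetImageHeader.at_10902f H rest frames F R Hc Fc u₀ e ret s_109029 := {
      entry := hbody.entry
      pre := hbody.pre
      rip := w_rip
      rsp := w_rsp
      rbx := (w_kept.get .rbx rfl).trans hbody.rbx
      rbp := (w_kept.get .rbp rfl).trans hbody.rbp
      slot_r15 := by
        rw [w_mem]
        exact k_r15
      slot_r14 := by
        rw [w_mem]
        exact k_r14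
      slot_r13 := by
        rw [w_mem]
        exact k_r13
      slot_r12 := by
        rw [w_mem]
        exact k_r12
      slot_rbp := by
        rw [w_mem]
        exact k_rbp
      slot_rbx := by
        rw [w_mem]
        exact k_rbx
      slot_ra := by
        rw [w_mem]
        exact k_ra
      inv := by
        rw [w_mem]
        exact hbody.inv
      region := hbody.region
      forest := hbody.forest
      ok := by
        rw [w_mem]
        exact hbody.ok
      rem := by
        rw [w_mem]
        exact hbody.rem
      same := by
        rw [w_mem]
        exact hsame
      code := ProgX.Base.conv_code_in w_eq
      abi := by
        refine ProgX.Base.abiInv_of ?_ ?_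
        · rw [w_flags]
          simp only [X86.User.df_setStatus]
          exact hdf
        · rw [w_mxcsr]
          exact hmx
    }
    refine ReachVia.done (Or.inl ?_)
    exact {
      mid := {
        body := hbody1
        r12 := by
          rw [w_kept.get .r12 rfl]
          exact c_r12n
      }
      loop := by
        refine ⟨mp, hicm, ?_, ?_⟩
        · rw [w_kept.get .r14 rfl]
          exact hi_lt
        · rw [w_kept.get .r14 rfl]
          exact hmeas
    }

end Gif.Spec.DGifGetImageHeader_4
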